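-- pv_equiv track=rewrite | github.com/eggnee/Algorithm | 프로그래머스/3/42895. N으로 표현/N으로 표현.py | solution
-- ===== SOURCE A (Python) =====
-- def solution(N, number):
--     num_list = [set([int(str(N) * (i+1))]) for i in range(8)]
--
--     for i in range(8):
--         if number in num_list[i]:
--             return i + 1
--         for j in range(i):
--             for op1 in num_list[j]:
--                 for op2 in num_list[i - j - 1]:
--                     num_list[i].add(op1 + op2)
--                     num_list[i].add(op1 - op2)
--                     num_list[i].add(op1 * op2)
--
--                     if op2 != 0:
--                         num_list[i].add(op1 // op2)
--
--                     if number in num_list[i]: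
--                         return i + 1
--     return -1
-- ===== SOURCE B (Python) =====
-- def solution(N, number):
--     memo = {}
--
--     def reachable(count):
--         if count in memo:
--             return memo[count]
--         vals = {int(str(N) * count)}
--         for j in range(1, count):
--             for a in reachable(j):
--                 for b in reachable(count - j):
--                     vals.add(a + b)
--                     vals.add(a - b)
--                     vals.add(a * b)
--                     if b != 0:
--                         vals.add(a // b)
--         memo[count] = vals
--         return vals
--
--     for count in range(1, 9):
--         if number in reachable(count):
--             return count
--     return -1
-- ===== Notes on version B (the rewrite author's own statement) =====
-- stated objective: alternative
-- what changed: Replaces A's bottom-up 8-slot DP table with in-place mutation and early returns inside the build loops by a memoized top-down recursion reachable(count) over the copy-count, with a separate level-by-level membership scan.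
import Mathlib
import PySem

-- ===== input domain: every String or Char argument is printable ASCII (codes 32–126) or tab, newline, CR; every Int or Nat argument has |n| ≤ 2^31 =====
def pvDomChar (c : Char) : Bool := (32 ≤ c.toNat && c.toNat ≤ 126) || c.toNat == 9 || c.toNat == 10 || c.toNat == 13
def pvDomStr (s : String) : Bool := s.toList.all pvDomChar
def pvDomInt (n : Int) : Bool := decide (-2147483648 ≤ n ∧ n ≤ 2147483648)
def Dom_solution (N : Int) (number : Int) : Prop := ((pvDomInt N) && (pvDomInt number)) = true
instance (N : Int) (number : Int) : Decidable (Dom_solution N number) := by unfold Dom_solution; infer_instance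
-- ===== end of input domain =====

-- B replaces A's bottom-up 8-slot DP table with early returns inside the build loops by a
-- memoized top-down recursion reachable(count) over the copy-count, checked level by level
-- (objective: alternative).
-- The Python sets are internal only (the result is an Int and never depends on a set's
-- iteration order), so they are modelled by Std.TreeSet Int: exact membership semantics,
-- evaluable on the full |N| ≤ 2^31 domain.

-- ===== PORT A =====

abbrev PvSet := Std.TreeSet Int compare

def pvEmpty : PvSet := Std.TreeSet.empty

-- str(N) * k  (Python string repetition, ported by hand: exact — plain concatenation)
def pvRep (cs : List Char) : Nat → List Char
  | 0 => []
  | n + 1 => cs ++ pvRep cs n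

-- int(str(N) * k); the ValueError (N < 0 with k ≥ 2) is excluded by Pre_solution,
-- so the .getD 0 default is unreachable on the claimed domain
def pvRepunit (N : Int) (k : Nat) : Int :=
  (PySem.Int.ofChars? (pvRep (PySem.Int.toChars N) k)).getD 0

-- the four set.add calls of the innermost loop body (identical in both Pythons)
def pvAddOps (s : PvSet) (op1 op2 : Int) : PvSet :=
  let s := s.insert (op1 + op2)
  let s := s.insert (op1 - op2)
  let s := s.insert (op1 * op2)
  if op2 ≠ 0 then s.insert (PySem.Int.floordiv op1 op2) else s

-- 'for op1 in num_list[j]: for op2 in num_list[i-j-1]: adds; if number in num_list[i]: return i+1'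
def pvOp1Loop (number : Int) (i : Nat) (setB : PvSet) (acc : PvSet) :
    List Int → Except Int PvSet
  | [] => .ok acc
  | op1 :: rest =>
    let acc' := setB.toList.foldl (fun a op2 => pvAddOps a op1 op2) acc
    if acc'.contains number then .error ((i : Int) + 1)
    else pvOp1Loop number i setB acc' rest

-- 'for j in range(i): …'
def pvJLoop (number : Int) (i : Nat) (lists : List PvSet) (acc : PvSet) :
    List Nat → Except Int PvSet
  | [] => .ok acc
  | j :: rest =>
    match pvOp1Loop number i (lists.getD (i - j - 1) pvEmpty) acc
        (lists.getD j pvEmpty).toList with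
    | .error r => .error r
    | .ok acc' => pvJLoop number i lists acc' rest

-- 'for i in range(8): if number in num_list[i]: return i+1; …'
def pvOuterA (number : Int) (lists : List PvSet) : List Nat → Int
  | [] => -1
  | i :: rest =>
    if (lists.getD i pvEmpty).contains number then (i : Int) + 1
    else
      match pvJLoop number i lists (lists.getD i pvEmpty) (List.range i) with
      | .error r => r
      | .ok s => pvOuterA number (lists.set i s) rest

def solution (N : Int) (number : Int) : Int :=
  pvOuterA number ((List.range 8).map (fun i => pvEmpty.insert (pvRepunit N (i + 1))))
    (List.range 8)

-- ===== PORT B =====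

-- B's doubly nested loop adding all combinations of two reachable sets into vals
def pvCombine (acc sA sB : PvSet) : PvSet :=
  sA.toList.foldl (fun a op1 => sB.toList.foldl (fun a2 op2 => pvAddOps a2 op1 op2) a) acc

-- reachable(count) with its memo dict threaded through (Source B's `memo`); keys are Python ints
def pvReachM (N : Int) (c : Nat) (memo : PySem.Dict Int PvSet) :
    PvSet × PySem.Dict Int PvSet :=
  match PySem.Dict.get? memo (c : Int) with
  | some v => (v, memo)
  | none =>
    let res :=
      (List.range (c - 1)).attach.foldl
        (fun (p : PvSet × PySem.Dict Int PvSet) j =>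
          (pvCombine p.1 (pvReachM N (j.1 + 1) p.2).1
             (pvReachM N (c - 1 - j.1) (pvReachM N (j.1 + 1) p.2).2).1,
           (pvReachM N (c - 1 - j.1) (pvReachM N (j.1 + 1) p.2).2).2))
        (pvEmpty.insert (pvRepunit N c), memo)
    (res.1, PySem.Dict.insert res.2 (c : Int) res.1)
  termination_by c
  decreasing_by
    all_goals (have := List.mem_range.mp j.2; omega)

-- 'for count in range(1, 9): if number in reachable(count): return count'
def pvAltLoopM (N number : Int) (memo : PySem.Dict Int PvSet) : List Nat → Int
  | [] => -1
  | c :: rest =>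
    let r := pvReachM N c memo
    if r.1.contains number then (c : Int) else pvAltLoopM N number r.2 rest

def solution_alt (N : Int) (number : Int) : Int :=
  pvAltLoopM N number PySem.Dict.empty (List.range' 1 8)

-- ===== PRECONDITION & SPEC =====
-- Pre_ excludes N < 0: there A's upfront comprehension computes int(str(N)*2) = int("-2-2") and
-- raises ValueError (the comprehension runs before any lookup, so every N < 0 raises).
def Pre_solution (N : Int) (number : Int) : Prop := 0 ≤ N
instance (N : Int) (number : Int) : Decidable (Pre_solution N number) := by
  unfold Pre_solution; infer_instance
def pvWitness_solution : Int × Int := (5, 12)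

def Spec_solution (N : Int) (number : Int) (out : Int) : Prop := out = solution_alt N number
instance (N : Int) (number : Int) (out : Int) : Decidable (Spec_solution N number out) := by
  unfold Spec_solution; infer_instance

-- ===== CLAIM (what is proved, stated in full; the proofs are below) =====
def Claim_equal_solution : Prop := ∀ (N : Int) (number : Int), Dom_solution N number → Pre_solution N number → Spec_solution N number (solution N number)

-- ===== LEMMAS AND PROOFS =====

-- the (unmemoized) value of reachable(count): what every memo entry holds
def pvReach (N : Int) : Nat → PvSet
  | c =>
    (List.range (c - 1)).attach.foldl
      (fun acc j => pvCombine acc (pvReach N (j.1 + 1)) (pvReach N (c - 1 - j.1)))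
      (pvEmpty.insert (pvRepunit N c))
  termination_by c => c
  decreasing_by
    all_goals (have := List.mem_range.mp j.2; omega)

-- the pure level-by-level scan B's loop amounts to
def pvAltLoopP (N number : Int) : List Nat → Int
  | [] => -1
  | c :: rest =>
    if (pvReach N c).contains number then (c : Int) else pvAltLoopP N number rest

theorem mem_pvAddOps_of_mem {s : PvSet} {x a b : Int} (h : x ∈ s) :
    x ∈ pvAddOps s a b := by
  unfold pvAddOps
  split <;> simp [Std.TreeSet.mem_insert, h]

theorem mem_foldl_addOps_of_mem {x op1 : Int} (l : List Int) :
    ∀ {acc : PvSet}, x ∈ acc →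
      x ∈ l.foldl (fun a op2 => pvAddOps a op1 op2) acc := by
  induction l with
  | nil => intro acc h; simpa using h
  | cons b t ih =>
    intro acc h
    exact ih (mem_pvAddOps_of_mem h)

theorem mem_pvCombine_of_mem {x : Int} (l : List Int) {sB : PvSet} :
    ∀ {acc : PvSet}, x ∈ acc →
      x ∈ l.foldl (fun a op1 => sB.toList.foldl (fun a2 op2 => pvAddOps a2 op1 op2) a) acc := by
  induction l with
  | nil => intro acc h; simpa using h
  | cons a t ih =>
    intro acc h
    exact ih (mem_foldl_addOps_of_mem _ h)

theorem mem_pvCombine_of_mem' {x : Int} (sA sB : PvSet) {acc : PvSet} (h : x ∈ acc) :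
    x ∈ pvCombine acc sA sB :=
  mem_pvCombine_of_mem sA.toList h

-- pvOp1Loop with a nonempty op1 list returns the fully built set, erroring iff number is in it
theorem pvOp1Loop_eq (number : Int) (i : Nat) (setB : PvSet) :
    ∀ (ops1 : List Int) (acc : PvSet), ops1 ≠ [] →
      pvOp1Loop number i setB acc ops1 =
        if number ∈ ops1.foldl
            (fun a op1 => setB.toList.foldl (fun a2 op2 => pvAddOps a2 op1 op2) a) acc
        then .error ((i : Int) + 1)
        else .ok (ops1.foldl
            (fun a op1 => setB.toList.foldl (fun a2 op2 => pvAddOps a2 op1 op2) a) acc) := by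
  intro ops1
  induction ops1 with
  | nil => intro acc h; exact absurd rfl h
  | cons op1 rest ih =>
    intro acc _
    rw [pvOp1Loop]
    by_cases hc : number ∈ setB.toList.foldl (fun a op2 => pvAddOps a op1 op2) acc
    · have hcb : (setB.toList.foldl (fun a op2 => pvAddOps a op1 op2) acc).contains number
          = true := Std.TreeSet.contains_iff_mem.mpr hc
      have hfull : number ∈ (op1 :: rest).foldl
          (fun a op1 => setB.toList.foldl (fun a2 op2 => pvAddOps a2 op1 op2) a) acc := by
        rw [List.foldl_cons]
        exact mem_pvCombine_of_mem rest hc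
      rw [if_pos hcb, if_pos hfull]
    · have hcb : ¬ (setB.toList.foldl (fun a op2 => pvAddOps a op1 op2) acc).contains number
          = true := fun h => hc (Std.TreeSet.contains_iff_mem.mp h)
      rcases rest with _ | ⟨r, rs⟩
      · rw [if_neg hcb, List.foldl_cons, List.foldl_nil, if_neg hc]
        rfl
      · rw [if_neg hcb, List.foldl_cons]
        exact ih _ (by simp)

-- the pure value the j-loop builds
def pvJBuild (i : Nat) (lists : List PvSet) (js : List Nat) (acc : PvSet) : PvSet :=
  js.foldl (fun a j => pvCombine a (lists.getD j pvEmpty) (lists.getD (i - j - 1) pvEmpty)) acc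

theorem mem_pvJBuild_of_mem {x : Int} {i : Nat} {lists : List PvSet} (js : List Nat) :
    ∀ {acc : PvSet}, x ∈ acc → x ∈ pvJBuild i lists js acc := by
  induction js with
  | nil => intro acc h; simpa [pvJBuild] using h
  | cons j t ih =>
    intro acc h
    simpa [pvJBuild, List.foldl_cons] using ih (mem_pvCombine_of_mem' _ _ h)

theorem pvJLoop_eq (number : Int) (i : Nat) (lists : List PvSet) :
    ∀ (js : List Nat) (acc : PvSet), js ≠ [] →
      (∀ j ∈ js, (lists.getD j pvEmpty).toList ≠ []) →
      pvJLoop number i lists acc js =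
        if number ∈ pvJBuild i lists js acc then .error ((i : Int) + 1)
        else .ok (pvJBuild i lists js acc) := by
  intro js
  induction js with
  | nil => intro acc h; exact absurd rfl h
  | cons j rest ih =>
    intro acc _ hne
    have hj : (lists.getD j pvEmpty).toList ≠ [] := hne j (by simp)
    have hop := pvOp1Loop_eq number i (lists.getD (i - j - 1) pvEmpty)
      (lists.getD j pvEmpty).toList acc hj
    have hbuild : pvJBuild i lists (j :: rest) acc =
        pvJBuild i lists rest (pvCombine acc (lists.getD j pvEmpty)
          (lists.getD (i - j - 1) pvEmpty)) := by
      simp [pvJBuild, List.foldl_cons]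
    rw [pvJLoop, hop]
    by_cases hc : number ∈ pvCombine acc (lists.getD j pvEmpty) (lists.getD (i - j - 1) pvEmpty)
    · have hcf : number ∈ (lists.getD j pvEmpty).toList.foldl
          (fun a op1 => (lists.getD (i - j - 1) pvEmpty).toList.foldl
            (fun a2 op2 => pvAddOps a2 op1 op2) a) acc := hc
      have hfull : number ∈ pvJBuild i lists (j :: rest) acc := by
        rw [hbuild]; exact mem_pvJBuild_of_mem _ hc
      rw [if_pos hcf, if_pos hfull]
    · have hcf : number ∉ (lists.getD j pvEmpty).toList.foldl
          (fun a op1 => (lists.getD (i - j - 1) pvEmpty).toList.foldl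
            (fun a2 op2 => pvAddOps a2 op1 op2) a) acc := hc
      rw [if_neg hcf, hbuild]
      rcases rest with _ | ⟨r, rs⟩
      · have h0 : pvJBuild i lists []
            (pvCombine acc (lists.getD j pvEmpty) (lists.getD (i - j - 1) pvEmpty)) =
            pvCombine acc (lists.getD j pvEmpty) (lists.getD (i - j - 1) pvEmpty) := by
          simp [pvJBuild]
        rw [h0, if_neg hc]
        exact rfl
      · exact ih _ (by simp) (fun x hx => hne x (by simp [hx]))

-- pvReach without the attach wrapper
theorem pvReach_eq (N : Int) (c : Nat) :
    pvReach N c =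
      (List.range (c - 1)).foldl
        (fun acc j => pvCombine acc (pvReach N (j + 1)) (pvReach N (c - 1 - j)))
        (pvEmpty.insert (pvRepunit N c)) := by
  conv_lhs => rw [pvReach]
  conv_rhs => rw [← List.attach_map_subtype_val (List.range (c - 1)), List.foldl_map]

theorem pvReach_one (N : Int) : pvReach N 1 = pvEmpty.insert (pvRepunit N 1) := by
  rw [pvReach_eq]
  rfl

theorem mem_repunit_pvReach (N : Int) (c : Nat) : pvRepunit N c ∈ pvReach N c := by
  rw [pvReach_eq]
  have hmem : pvRepunit N c ∈ pvEmpty.insert (pvRepunit N c) := by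
    simp [Std.TreeSet.mem_insert]
  revert hmem
  generalize pvEmpty.insert (pvRepunit N c) = base
  induction List.range (c - 1) generalizing base with
  | nil => intro h; simpa using h
  | cons a t iht => intro h; exact iht _ (mem_pvCombine_of_mem' _ _ h)

theorem pvReach_toList_ne_nil (N : Int) (c : Nat) : (pvReach N c).toList ≠ [] :=
  List.ne_nil_of_mem (Std.TreeSet.mem_toList.mpr (mem_repunit_pvReach N c))

-- the outer-loop invariant: slots below k hold the finished level sets, slots from k the seeds
def pvInv (N : Int) (k : Nat) (lists : List PvSet) : Prop :=
  lists.length = 8 ∧ ∀ m, m < 8 →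
    lists.getD m pvEmpty =
      if m < k then pvReach N (m + 1) else pvEmpty.insert (pvRepunit N (m + 1))

-- the j-loop at level k, reading finished levels, builds exactly pvReach N (k+1)
theorem pvJBuild_eq_reach (N : Int) (k : Nat) (hk : k < 8) (lists : List PvSet)
    (hinv : pvInv N k lists) :
    pvJBuild k lists (List.range k) (pvEmpty.insert (pvRepunit N (k + 1))) =
      pvReach N (k + 1) := by
  rw [pvReach_eq]
  unfold pvJBuild
  simp only [Nat.add_sub_cancel]
  refine PySem.List.foldl_congr_mem _ _ _ _ ?_
  intro acc j hj
  have hj' : j < k := List.mem_range.mp hj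
  rw [hinv.2 j (by omega), if_pos hj', hinv.2 (k - j - 1) (by omega), if_pos (by omega)]
  have h1 : k - j - 1 + 1 = k - j := by omega
  rw [h1]

theorem pvOuter_eq (N number : Int) :
    ∀ (n k : Nat) (lists : List PvSet), k + n = 8 → pvInv N k lists →
      pvOuterA number lists (List.range' k n) = pvAltLoopP N number (List.range' (k + 1) n) := by
  intro n
  induction n with
  | zero => intro k lists _ _; rfl
  | succ n ih =>
    intro k lists hkn hinv
    have hk : k < 8 := by omega
    have hlen := hinv.1
    have hgetk : lists.getD k pvEmpty = pvEmpty.insert (pvRepunit N (k + 1)) := by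
      have h := hinv.2 k hk
      rwa [if_neg (lt_irrefl k)] at h
    have hJB : pvJBuild k lists (List.range k) (lists.getD k pvEmpty) = pvReach N (k + 1) := by
      rw [hgetk]; exact pvJBuild_eq_reach N k hk lists hinv
    rw [List.range'_succ, List.range'_succ, pvOuterA, pvAltLoopP]
    by_cases hb : number ∈ pvReach N (k + 1)
    · rw [if_pos (Std.TreeSet.contains_iff_mem.mpr hb)]
      by_cases hc1 : (lists.getD k pvEmpty).contains number = true
      · rw [if_pos hc1]; push_cast; ring
      · rw [if_neg hc1]
        rcases Nat.eq_zero_or_pos k with hk0 | hkpos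
        · exfalso
          apply hc1
          subst hk0
          rw [hgetk, ← pvReach_one N]
          exact Std.TreeSet.contains_iff_mem.mpr hb
        · have hjs : List.range k ≠ [] := by
            simpa [List.range_eq_nil] using Nat.pos_iff_ne_zero.mp hkpos
          have hne : ∀ j ∈ List.range k, (lists.getD j pvEmpty).toList ≠ [] := by
            intro j hj
            rw [hinv.2 j (by have := List.mem_range.mp hj; omega),
              if_pos (List.mem_range.mp hj)]
            exact pvReach_toList_ne_nil N _
          rw [pvJLoop_eq number k lists (List.range k) (lists.getD k pvEmpty) hjs hne, hJB,
            if_pos hb]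
          push_cast; ring
    · have hc1 : ¬ (lists.getD k pvEmpty).contains number = true := by
        intro h
        exact hb (hJB ▸ mem_pvJBuild_of_mem _ (Std.TreeSet.contains_iff_mem.mp h))
      rw [if_neg ((fun h => hb (Std.TreeSet.contains_iff_mem.mp h)) :
        ¬ (pvReach N (k + 1)).contains number = true), if_neg hc1]
      have hinv' : pvInv N (k + 1) (lists.set k (pvReach N (k + 1))) := by
        refine ⟨by simp [hlen], ?_⟩
        intro m hm
        by_cases hmk : m = k
        · subst hmk
          rw [List.getD_eq_getElem?_getD, List.getElem?_set_self (by omega), Option.getD_some,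
            if_pos (by omega)]
        · rw [List.getD_eq_getElem?_getD, List.getElem?_set_ne (fun h => hmk h.symm),
            ← List.getD_eq_getElem?_getD, hinv.2 m hm]
          by_cases hmk2 : m < k
          · rw [if_pos hmk2, if_pos (by omega)]
          · rw [if_neg hmk2, if_neg (by omega)]
      have hrec := ih (k + 1) (lists.set k (pvReach N (k + 1))) (by omega) hinv'
      rcases Nat.eq_zero_or_pos k with hk0 | hkpos
      · subst hk0
        have hjl : pvJLoop number 0 lists (lists.getD 0 pvEmpty) (List.range 0) =
            .ok (lists.getD 0 pvEmpty) := rfl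
        rw [hjl]
        have h0 : lists.getD 0 pvEmpty = pvReach N 1 := by rw [hgetk, pvReach_one]
        rw [h0]
        exact hrec
      · have hjs : List.range k ≠ [] := by
          simpa [List.range_eq_nil] using Nat.pos_iff_ne_zero.mp hkpos
        have hne : ∀ j ∈ List.range k, (lists.getD j pvEmpty).toList ≠ [] := by
          intro j hj
          rw [hinv.2 j (by have := List.mem_range.mp hj; omega),
            if_pos (List.mem_range.mp hj)]
          exact pvReach_toList_ne_nil N _
        rw [pvJLoop_eq number k lists (List.range k) (lists.getD k pvEmpty) hjs hne, hJB,
          if_neg hb]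
        exact hrec

-- every memo entry holds the (unmemoized) reachable set of its count
def pvMemoOK (N : Int) (m : PySem.Dict Int PvSet) : Prop :=
  ∀ (c : Nat) (v : PvSet), PySem.Dict.get? m (c : Int) = some v → v = pvReach N c

theorem pvMemoOK_empty (N : Int) : pvMemoOK N PySem.Dict.empty := by
  intro c v h
  simp [PySem.Dict.empty, PySem.Dict.get?] at h

theorem pvMemoOK_insert {N : Int} {m : PySem.Dict Int PvSet} (hm : pvMemoOK N m) (c : Nat) :
    pvMemoOK N (PySem.Dict.insert m (c : Int) (pvReach N c)) := by
  intro c' v h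
  by_cases hc : (c' : Int) = (c : Int)
  · have hcc : c' = c := by exact_mod_cast hc
    subst hcc
    rw [hc, PySem.Dict.get?_insert_self] at h
    exact (Option.some_inj.mp h).symm
  · rw [PySem.Dict.get?_insert_of_ne _ _ (fun h' => hc (by simpa using h'))] at h
    exact hm c' v h

theorem pvReachM_spec (N : Int) :
    ∀ (c : Nat) (m : PySem.Dict Int PvSet), pvMemoOK N m →
      (pvReachM N c m).1 = pvReach N c ∧ pvMemoOK N (pvReachM N c m).2 := by
  intro c
  induction c using Nat.strong_induction_on with
  | _ c IH =>
    intro m hm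
    rw [pvReachM]
    cases hget : PySem.Dict.get? m (c : Int) with
    | some v =>
      simp only [hget]
      exact ⟨hm c v hget, hm⟩
    | none =>
      simp only [hget]
      have hfold : ∀ (l : List {x // x ∈ List.range (c - 1)}) (acc : PvSet)
          (mm : PySem.Dict Int PvSet), pvMemoOK N mm →
          (l.foldl (fun (p : PvSet × PySem.Dict Int PvSet) j =>
              (pvCombine p.1 (pvReachM N (j.1 + 1) p.2).1
                 (pvReachM N (c - 1 - j.1) (pvReachM N (j.1 + 1) p.2).2).1,
               (pvReachM N (c - 1 - j.1) (pvReachM N (j.1 + 1) p.2).2).2)) (acc, mm)).1 =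
            l.foldl (fun acc j => pvCombine acc (pvReach N (j.1 + 1)) (pvReach N (c - 1 - j.1)))
              acc ∧
          pvMemoOK N (l.foldl (fun (p : PvSet × PySem.Dict Int PvSet) j =>
              (pvCombine p.1 (pvReachM N (j.1 + 1) p.2).1
                 (pvReachM N (c - 1 - j.1) (pvReachM N (j.1 + 1) p.2).2).1,
               (pvReachM N (c - 1 - j.1) (pvReachM N (j.1 + 1) p.2).2).2)) (acc, mm)).2 := by
        intro l
        induction l with
        | nil => intro acc mm hmm; exact ⟨rfl, hmm⟩
        | cons j t iht =>
          intro acc mm hmm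
          have hjr := List.mem_range.mp j.2
          have h1 := IH (j.1 + 1) (by omega) mm hmm
          have h2 := IH (c - 1 - j.1) (by omega) (pvReachM N (j.1 + 1) mm).2 h1.2
          simp only [List.foldl_cons]
          have hstep := iht (pvCombine acc (pvReach N (j.1 + 1)) (pvReach N (c - 1 - j.1)))
            (pvReachM N (c - 1 - j.1) (pvReachM N (j.1 + 1) mm).2).2 h2.2
          rw [h1.1, h2.1]
          exact hstep
      have hres := hfold (List.range (c - 1)).attach (pvEmpty.insert (pvRepunit N c)) m hm
      have hpure : ((List.range (c - 1)).attach.foldl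
          (fun acc j => pvCombine acc (pvReach N (j.1 + 1)) (pvReach N (c - 1 - j.1)))
          (pvEmpty.insert (pvRepunit N c))) = pvReach N c := by
        rw [pvReach]
      rw [hpure] at hres
      exact ⟨hres.1, by
        have h2 := pvMemoOK_insert (N := N) hres.2 c
        rwa [← hres.1] at h2⟩

theorem pvAltLoopM_eq (N number : Int) :
    ∀ (l : List Nat) (m : PySem.Dict Int PvSet), pvMemoOK N m →
      pvAltLoopM N number m l = pvAltLoopP N number l := by
  intro l
  induction l with
  | nil => intro m _; rfl
  | cons c rest ih =>
    intro m hm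
    have h := pvReachM_spec N c m hm
    rw [pvAltLoopM, pvAltLoopP]
    simp only [h.1]
    by_cases hb : (pvReach N c).contains number = true
    · rw [if_pos hb, if_pos hb]
    · rw [if_neg hb, if_neg hb]
      exact ih _ h.2

-- ===== VERDICT (by name: the statement is the Claim_ definition above) =====
theorem solution_spec : Claim_equal_solution := by
  intro N number _ _
  unfold Spec_solution solution solution_alt
  have hinv0 : pvInv N 0 ((List.range 8).map (fun i => pvEmpty.insert (pvRepunit N (i + 1)))) := by
    refine ⟨by simp, ?_⟩
    intro m hm
    rw [if_neg (Nat.not_lt_zero m), List.getD_eq_getElem?_getD, List.getElem?_map,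
      List.getElem?_range hm]
    rfl
  have h := pvOuter_eq N number 8 0 _ rfl hinv0
  rw [List.range_eq_range'] at h ⊢
  rw [h]
  exact (pvAltLoopM_eq N number (List.range' 1 8) _ (pvMemoOK_empty N)).symm
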